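-- pv_equiv track=rewrite | github.com/burning-calamity/extirpation | src/extirpation/bundled_online/prime_step_caesar.py | prime_step_caesar_encrypt
-- ===== SOURCE A (Python) =====
-- def _shift(ch: str, amount: int) -> str:
--     if "A" <= ch <= "Z":
--         base = ord("A")
--         return chr(base + ((ord(ch) - base + amount) % 26))
--     if "a" <= ch <= "z":
--         base = ord("a")
--         return chr(base + ((ord(ch) - base + amount) % 26))
--     return ch
--
-- def _first_primes(n: int) -> list[int]:
--     primes: list[int] = []
--     candidate = 2
--     while len(primes) < n:
--         is_prime = True
--         for p in primes:
--             if p * p > candidate: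
--                 break
--             if candidate % p == 0:
--                 is_prime = False
--                 break
--         if is_prime:
--             primes.append(candidate)
--         candidate += 1
--     return primes
--
-- def prime_step_caesar_encrypt(plaintext: str) -> str:
--     """Encrypt each alphabetic character using successive prime shifts."""
--     letters = sum(1 for ch in plaintext if ch.isalpha())
--     primes = _first_primes(letters)
--     out: list[str] = []
--     i = 0
--     for ch in plaintext:
--         if ch.isalpha():
--             out.append(_shift(ch, primes[i]))
--             i += 1
--         else:
--             out.append(ch)
--     return "".join(out)
-- ===== SOURCE B (Python) =====
-- def _is_prime(c: int) -> bool: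
--     if c < 2:
--         return False
--     if c % 2 == 0:
--         return c == 2
--     d = 3
--     while d * d <= c:
--         if c % d == 0:
--             return False
--         d += 2
--     return True
--
-- def prime_step_caesar_encrypt(plaintext: str) -> str:
--     """Single pass: stream the primes on demand, no pre-count and no prime list."""
--     out = []
--     cand = 2
--     for ch in plaintext:
--         if ch.isalpha():
--             while not _is_prime(cand):
--                 cand += 1
--             base = ord("A") if ch <= "Z" else ord("a")
--             out.append(chr((ord(ch) - base + cand) % 26 + base))
--             cand += 1
--         else:
--             out.append(ch)
--     return "".join(out)
-- ===== Notes on version B (the rewrite author's own statement) =====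
-- stated objective: alternative
-- what changed: B makes a single pass over the string with an on-demand next-prime stream (trial division by 2 and the odd numbers up to sqrt), instead of A's three phases: count the letters, precompute a prime list by trial division against earlier primes, then index into it.
import Mathlib
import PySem

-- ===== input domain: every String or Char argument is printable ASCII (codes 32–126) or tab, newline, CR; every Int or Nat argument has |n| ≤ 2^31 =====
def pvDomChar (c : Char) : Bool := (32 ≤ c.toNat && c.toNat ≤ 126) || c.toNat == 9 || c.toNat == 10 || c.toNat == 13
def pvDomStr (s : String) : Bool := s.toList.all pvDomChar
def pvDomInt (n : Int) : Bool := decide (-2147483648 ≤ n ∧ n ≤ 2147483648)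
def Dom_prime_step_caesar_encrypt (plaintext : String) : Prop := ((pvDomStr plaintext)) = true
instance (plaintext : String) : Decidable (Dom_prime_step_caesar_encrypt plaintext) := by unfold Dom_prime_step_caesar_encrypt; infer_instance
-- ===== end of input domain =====

-- B re-implements A in a single pass with an on-demand next-prime stream (naive trial division)
-- instead of A's count-letters / precompute-prime-list / index scheme; objective: alternative
-- (same return value; no speed claim).

-- ===== PORT A =====

-- _shift(ch, amount)
def pyShift (ch : Char) (amount : Nat) : Char :=
  if 'A' ≤ ch ∧ ch ≤ 'Z' then Char.ofNat (65 + ((ch.toNat - 65 + amount) % 26))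
  else if 'a' ≤ ch ∧ ch ≤ 'z' then Char.ofNat (97 + ((ch.toNat - 97 + amount) % 26))
  else ch

-- the inner 'for p in primes' loop of _first_primes, with its two breaks
def trialDivA : List Nat → Nat → Bool
  | [], _ => true
  | p :: ps, c =>
    if p * p > c then true
    else if c % p == 0 then false
    else trialDivA ps c

-- the 'while len(primes) < n' loop; fuel only makes the while-loop total
-- (2^n steps always suffice: the loop stops once candidate passes the n-th prime, which is ≤ 2^n)
def firstPrimesLoop : Nat → List Nat → Nat → Nat → List Nat
  | 0, primes, _, _ => primes
  | fuel+1, primes, cand, n =>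
    if primes.length < n then
      firstPrimesLoop fuel (if trialDivA primes cand then primes ++ [cand] else primes) (cand + 1) n
    else primes

-- _first_primes(n)
def firstPrimes (n : Nat) : List Nat := firstPrimesLoop (2 ^ n) [] 2 n

-- body of A's 'for ch in plaintext' loop (state: out, i)
def stepA (primes : List Nat) (st : List Char × Nat) (ch : Char) : List Char × Nat :=
  if PySem.Chars.isalpha ch then (st.1 ++ [pyShift ch (primes.getD st.2 0)], st.2 + 1)
  else (st.1 ++ [ch], st.2)

def prime_step_caesar_encrypt (plaintext : String) : String :=
  let letters := plaintext.toList.foldl (fun acc ch => if PySem.Chars.isalpha ch then acc + 1 else acc) 0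
  let primes := firstPrimes letters
  String.ofList (plaintext.toList.foldl (stepA primes) ([], 0)).1

-- ===== PORT B =====

-- the 'while d * d <= c' loop of _is_prime; fuel c+1 covers all iterations (d ≤ sqrt c + 1)
def trialB : Nat → Nat → Nat → Bool
  | 0, _, _ => true
  | f+1, c, d =>
    if d * d ≤ c then (if c % d == 0 then false else trialB f c (d + 2))
    else true

-- _is_prime(c)
def isPrimeB (c : Nat) : Bool :=
  if c < 2 then false
  else if c % 2 == 0 then c == 2
  else trialB (c + 1) c 3

-- the 'while not _is_prime(cand)' loop; fuel c+1 suffices (Bertrand: a prime lies in [c, 2c-2] for c ≥ 2)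
def findNextF : Nat → Nat → Nat
  | 0, c => c
  | f+1, c => if isPrimeB c then c else findNextF f (c + 1)

def findNext (c : Nat) : Nat := findNextF (c + 1) c

-- body of B's 'for ch in plaintext' loop (state: out, cand)
def stepB (st : List Char × Nat) (ch : Char) : List Char × Nat :=
  if PySem.Chars.isalpha ch then
    let p := findNext st.2
    let base := if ch ≤ 'Z' then 65 else 97
    (st.1 ++ [Char.ofNat ((ch.toNat - base + p) % 26 + base)], p + 1)
  else (st.1 ++ [ch], st.2)

def prime_step_caesar_encrypt_alt (plaintext : String) : String :=
  String.ofList (plaintext.toList.foldl stepB ([], 2)).1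

-- ===== PRECONDITION & SPEC =====
def Spec_prime_step_caesar_encrypt (plaintext : String) (out : String) : Prop := out = prime_step_caesar_encrypt_alt plaintext
instance (plaintext : String) (out : String) : Decidable (Spec_prime_step_caesar_encrypt plaintext out) := by unfold Spec_prime_step_caesar_encrypt; infer_instance

-- ===== CLAIM (what is proved, stated in full; the proofs are below) =====
def Claim_equal_prime_step_caesar_encrypt : Prop := ∀ (plaintext : String), Dom_prime_step_caesar_encrypt plaintext → Spec_prime_step_caesar_encrypt plaintext (prime_step_caesar_encrypt plaintext)

-- ===== LEMMAS AND PROOFS =====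

-- spec-side helpers: the primes below c, and the stream of primes B walks through
def primesS (c : Nat) : List Nat := (List.range c).filter (fun m => decide (Nat.Prime m))

def qStream : Nat → Nat
  | 0 => findNext 2
  | k+1 => findNext (qStream k + 1)

lemma trialB_iff : ∀ (f c d : Nat), c < (d + 2 * f) * (d + 2 * f) →
    (trialB f c d = true ↔ ∀ e, d ≤ e → e * e ≤ c → e % 2 = d % 2 → c % e ≠ 0) := by
  intro f
  induction f with
  | zero =>
    intro c d h
    rw [Nat.mul_zero, Nat.add_zero] at h
    simp only [trialB, true_iff]
    intro e hde hec _
    have := Nat.mul_le_mul hde hde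
    omega
  | succ f ih =>
    intro c d h
    have h' : c < (d + 2 + 2 * f) * (d + 2 + 2 * f) := by
      have he : d + 2 + 2 * f = d + 2 * (f + 1) := by omega
      rw [he]; exact h
    simp only [trialB]
    split_ifs with h1 h2
    · simp only [false_iff]
      exact fun H => H d (le_refl d) h1 rfl (by simpa using h2)
    · rw [ih c (d + 2) h']
      constructor
      · intro H e hde hec hpar
        rcases Nat.lt_or_ge e (d + 2) with hlt | hge
        · have : e = d := by omega
          subst this
          simpa using h2
        · exact H e hge hec (by omega)
      · intro H e hde hec hpar
        exact H e (by omega) hec (by omega)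
    · simp only [true_iff]
      intro e hde hec _
      have := Nat.mul_le_mul hde hde
      omega

lemma isPrimeB_iff (c : Nat) : isPrimeB c = true ↔ Nat.Prime c := by
  by_cases hc : c < 2
  · simp only [isPrimeB, if_pos hc, Bool.false_eq_true, false_iff]
    intro hp
    exact absurd hp.two_le (by omega)
  · by_cases he : c % 2 = 0
    · have heb : (c % 2 == 0) = true := by simpa using he
      simp only [isPrimeB, if_neg hc, heb, if_true, beq_iff_eq]
      constructor
      · rintro rfl
        exact Nat.prime_two
      · intro hp
        exact (Nat.Prime.even_iff hp).mp (Nat.even_iff.mpr he)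
    · have heb : (c % 2 == 0) = false := by simp [he]
      simp only [isPrimeB, if_neg hc, heb, Bool.false_eq_true, if_false]
      rw [trialB_iff (c + 1) c 3 (by nlinarith)]
      constructor
      · intro H
        by_contra hp
        have hm1 : Nat.Prime c.minFac := Nat.minFac_prime (by omega)
        have hm2 : c.minFac ∣ c := Nat.minFac_dvd c
        have hm3 : c.minFac * c.minFac ≤ c := by
          have := Nat.minFac_sq_le_self (by omega : 0 < c) hp
          nlinarith [this]
        have hmne2 : c.minFac ≠ 2 := by
          intro h2
          rw [h2] at hm2
          exact he (Nat.dvd_iff_mod_eq_zero.mp hm2)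
        have hm4 : 3 ≤ c.minFac := by
          have := hm1.two_le
          omega
        have hmodd : c.minFac % 2 = 1 := by
          rcases Nat.mod_two_eq_zero_or_one c.minFac with h0 | h1
          · exfalso
            have : (2 : Nat) ∣ c.minFac := Nat.dvd_of_mod_eq_zero h0
            have h2c : (2 : Nat) ∣ c := dvd_trans this hm2
            exact he (Nat.dvd_iff_mod_eq_zero.mp h2c)
          · exact h1
        exact H c.minFac hm4 hm3 hmodd (Nat.dvd_iff_mod_eq_zero.mp hm2)
      · intro hp e h3e hec _ h0
        have hdvd : e ∣ c := Nat.dvd_iff_mod_eq_zero.mpr h0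
        rcases hp.eq_one_or_self_of_dvd e hdvd with rfl | rfl
        · omega
        · nlinarith

lemma findNextF_spec : ∀ (f c : Nat), (∃ p, Nat.Prime p ∧ c ≤ p ∧ p ≤ c + f) →
    c ≤ findNextF f c ∧ Nat.Prime (findNextF f c) ∧ ∀ p, c ≤ p → Nat.Prime p → findNextF f c ≤ p := by
  intro f
  induction f with
  | zero =>
    rintro c ⟨p, pp, h1, h2⟩
    have : p = c := by omega
    subst this
    exact ⟨le_refl _, pp, fun p' h1' _ => h1'⟩
  | succ f ih =>
    rintro c ⟨p, pp, hcp, hpf⟩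
    simp only [findNextF]
    split_ifs with h
    · exact ⟨le_refl _, (isPrimeB_iff c).mp h, fun p' h1 _ => h1⟩
    · have hcnp : ¬ Nat.Prime c := fun hp => h ((isPrimeB_iff c).mpr hp)
      have hp1 : c + 1 ≤ p := by
        rcases Nat.eq_or_lt_of_le hcp with rfl | hlt
        · exact absurd pp hcnp
        · omega
      obtain ⟨ha, hb, hm⟩ := ih (c + 1) ⟨p, pp, hp1, by omega⟩
      refine ⟨by omega, hb, ?_⟩
      intro p' h1 hp'
      have hne : p' ≠ c := fun e => hcnp (e ▸ hp')
      exact hm p' (by omega) hp'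

lemma findNext_spec (c : Nat) (hc : 2 ≤ c) :
    c ≤ findNext c ∧ Nat.Prime (findNext c) ∧ ∀ p, c ≤ p → Nat.Prime p → findNext c ≤ p := by
  obtain ⟨p, pp, h1, h2⟩ := Nat.exists_prime_lt_and_le_two_mul (c - 1) (by omega)
  exact findNextF_spec (c + 1) c ⟨p, pp, by omega, by omega⟩

lemma findNext_of_prime (c : Nat) (hc : 2 ≤ c) (h : Nat.Prime c) : findNext c = c := by
  obtain ⟨h1, _, h3⟩ := findNext_spec c hc
  exact le_antisymm (h3 c (le_refl c) h) h1

lemma findNext_of_not_prime (c : Nat) (hc : 2 ≤ c) (h : ¬ Nat.Prime c) : findNext c = findNext (c + 1) := by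
  obtain ⟨a1, a2, a3⟩ := findNext_spec c hc
  obtain ⟨b1, b2, b3⟩ := findNext_spec (c + 1) (by omega)
  have hne : findNext c ≠ c := fun e => h (e ▸ a2)
  exact le_antisymm (a3 _ (by omega) b2) (b3 _ (by omega) a2)

lemma qStream_prime (k : Nat) : Nat.Prime (qStream k) := by
  induction k with
  | zero => exact (findNext_spec 2 (le_refl 2)).2.1
  | succ k ih => exact (findNext_spec (qStream k + 1) (by have := ih.two_le; omega)).2.1

lemma qStream_two_le (k : Nat) : 2 ≤ qStream k := (qStream_prime k).two_le

lemma qStream_strictMono : StrictMono qStream := by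
  apply strictMono_nat_of_lt_succ
  intro k
  have := (findNext_spec (qStream k + 1) (by have := qStream_two_le k; omega)).1
  show qStream k < findNext (qStream k + 1)
  omega

lemma qStream_le_pow (k : Nat) : qStream k ≤ 2 ^ (k + 1) := by
  induction k with
  | zero => exact (findNext_spec 2 (le_refl 2)).2.2 2 (le_refl 2) Nat.prime_two
  | succ k ih =>
    obtain ⟨p, pp, h1, h2⟩ := Nat.exists_prime_lt_and_le_two_mul (qStream k) (by have := qStream_two_le k; omega)
    have hle : qStream (k + 1) ≤ p :=
      (findNext_spec (qStream k + 1) (by have := qStream_two_le k; omega)).2.2 p (by omega) pp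
    calc qStream (k + 1) ≤ p := hle
      _ ≤ 2 * qStream k := h2
      _ ≤ 2 * 2 ^ (k + 1) := by omega
      _ = 2 ^ (k + 2) := by ring

lemma mem_primesS {m c : Nat} : m ∈ primesS c ↔ m < c ∧ Nat.Prime m := by
  simp [primesS, List.mem_filter, List.mem_range]

lemma primesS_pairwise (c : Nat) : (primesS c).Pairwise (· < ·) :=
  List.Pairwise.sublist List.filter_sublist List.pairwise_lt_range

lemma primesS_succ (c : Nat) :
    primesS (c + 1) = primesS c ++ if Nat.Prime c then [c] else [] := by
  simp [primesS, List.range_succ, List.filter_append]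
  split_ifs with h <;> simp [h]

-- A's trial division is a correct primality test against a complete sorted list of smaller primes
lemma trialDivA_of_prime (c : Nat) (hc : Nat.Prime c) :
    ∀ l : List Nat, (∀ p ∈ l, Nat.Prime p ∧ p < c) → trialDivA l c = true := by
  intro l
  induction l with
  | nil => intro; simp [trialDivA]
  | cons p ps ih =>
    intro h
    have hp := h p List.mem_cons_self
    simp only [trialDivA]
    split_ifs with h1 h2
    · rfl
    · exfalso
      have hdvd : p ∣ c := Nat.dvd_iff_mod_eq_zero.mpr (by simpa using h2)
      rcases hc.eq_one_or_self_of_dvd p hdvd with rfl | rfl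
      · exact absurd hp.1.two_le (by omega)
      · exact absurd hp.2 (by omega)
    · exact ih (fun x hx => h x (List.mem_cons_of_mem _ hx))

lemma trialDivA_false_aux (c : Nat) :
    ∀ l : List Nat, l.Pairwise (· < ·) → ∀ m ∈ l, m * m ≤ c → m ∣ c → trialDivA l c = false := by
  intro l
  induction l with
  | nil => intro _ m hm; simp at hm
  | cons p ps ih =>
    intro hpw m hm hm2 hmd
    simp only [trialDivA]
    split_ifs with h1 h2
    · exfalso
      rcases List.mem_cons.mp hm with rfl | hm'
      · omega
      · have hpm : p < m := (List.pairwise_cons.mp hpw).1 m hm'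
        have : p * p ≤ m * m := Nat.mul_le_mul (by omega) (by omega)
        omega
    · rfl
    · rcases List.mem_cons.mp hm with rfl | hm'
      · exact absurd (Nat.dvd_iff_mod_eq_zero.mp hmd) (by simpa using h2)
      · exact ih (List.pairwise_cons.mp hpw).2 m hm' hm2 hmd

lemma trialDivA_of_not_prime (c : Nat) (hc : 2 ≤ c) (h : ¬ Nat.Prime c) :
    trialDivA (primesS c) c = false := by
  have hm1 : Nat.Prime c.minFac := Nat.minFac_prime (by omega)
  have hm2 : c.minFac ∣ c := Nat.minFac_dvd c
  have hm3 : c.minFac * c.minFac ≤ c := by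
    have := Nat.minFac_sq_le_self (by omega : 0 < c) h
    nlinarith [this]
  have hmle : c.minFac ≤ c := Nat.le_of_dvd (by omega) hm2
  have hm4 : c.minFac < c := by
    rcases Nat.eq_or_lt_of_le hmle with he | hlt
    · exfalso; have := hm1.two_le; nlinarith [hm3, he]
    · exact hlt
  exact trialDivA_false_aux c (primesS c) (primesS_pairwise c) c.minFac
    (mem_primesS.mpr ⟨hm4, hm1⟩) hm3 hm2

-- the primes below c are exactly the first (π c) elements of B's stream, and
-- B's next-prime search from c lands on the next stream element
lemma primesS_two : primesS 2 = [] := by decide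

lemma primesS_qStream : ∀ c, 2 ≤ c →
    primesS c = List.map qStream (List.range (primesS c).length) ∧
    findNext c = qStream (primesS c).length := by
  intro c hc
  induction c, hc using Nat.le_induction with
  | base => rw [primesS_two]; exact ⟨rfl, rfl⟩
  | succ c hc ih =>
    obtain ⟨ih1, ih2⟩ := ih
    by_cases hp : Nat.Prime c
    · have hfc : findNext c = c := findNext_of_prime c hc hp
      have hqk : qStream (primesS c).length = c := by rw [← ih2, hfc]
      have hS : primesS (c + 1) = primesS c ++ [c] := by rw [primesS_succ]; simp [hp]
      have hlen : (primesS (c + 1)).length = (primesS c).length + 1 := by rw [hS]; simp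
      constructor
      · rw [hlen, hS, List.range_succ, List.map_append, ← ih1]
        simp [hqk]
      · rw [hlen]
        show findNext (c + 1) = findNext (qStream (primesS c).length + 1)
        rw [hqk]
    · have hS : primesS (c + 1) = primesS c := by rw [primesS_succ]; simp [hp]
      refine ⟨by rw [hS]; exact ih1, ?_⟩
      rw [hS, ← findNext_of_not_prime c hc hp]
      exact ih2

-- when the loop stops with as many primes as requested, the invariant closes the proof
lemma primesS_done (c n : Nat) (hc : 2 ≤ c) (hn : (primesS c).length = n) :
    primesS c = List.map qStream (List.range n) := by
  rw [← hn]; exact (primesS_qStream c hc).1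

lemma length_primesS_ge (c m : Nat) (hc : 2 ≤ c) (h : qStream m < c) :
    m < (primesS c).length := by
  have hmem : qStream m ∈ primesS c := mem_primesS.mpr ⟨h, qStream_prime m⟩
  rw [(primesS_qStream c hc).1] at hmem
  obtain ⟨j, hj, hje⟩ := List.mem_map.mp hmem
  rw [List.mem_range] at hj
  have : j = m := qStream_strictMono.injective hje
  omega

lemma firstPrimesLoop_inv : ∀ (fuel c n : Nat), 2 ≤ c → (primesS c).length ≤ n →
    (n = 0 ∨ qStream (n - 1) < c + fuel) →
    firstPrimesLoop fuel (primesS c) c n = List.map qStream (List.range n) := by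
  intro fuel
  induction fuel with
  | zero =>
    intro c n h2 hk H
    simp only [firstPrimesLoop]
    rcases H with rfl | H
    · exact primesS_done c 0 h2 (by omega)
    · rcases n with _ | m
      · exact primesS_done c 0 h2 (by omega)
      · have := length_primesS_ge c m h2 (by simpa using H)
        exact primesS_done c (m + 1) h2 (by omega)
  | succ fuel ih =>
    intro c n h2 hk H
    have H' : n = 0 ∨ qStream (n - 1) < (c + 1) + fuel := by
      rcases H with rfl | H
      · exact Or.inl rfl
      · exact Or.inr (by omega)
    simp only [firstPrimesLoop]
    split_ifs with hlt ht
    · have hp : Nat.Prime c := by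
        by_contra hp
        rw [trialDivA_of_not_prime c h2 hp] at ht
        simp at ht
      have hS : primesS c ++ [c] = primesS (c + 1) := by rw [primesS_succ]; simp [hp]
      have hlen : (primesS (c + 1)).length = (primesS c).length + 1 := by rw [← hS]; simp
      rw [hS]
      exact ih (c + 1) n (by omega) (by omega) H'
    · have hp : ¬ Nat.Prime c := by
        intro hp
        exact ht (trialDivA_of_prime c hp _ (fun p hp' => ⟨(mem_primesS.mp hp').2, (mem_primesS.mp hp').1⟩))
      have hS : primesS (c + 1) = primesS c := by rw [primesS_succ]; simp [hp]
      rw [← hS]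
      exact ih (c + 1) n (by omega) (by rw [hS]; omega) H'
    · exact primesS_done c n h2 (by omega)

lemma firstPrimes_eq (n : Nat) : firstPrimes n = List.map qStream (List.range n) := by
  unfold firstPrimes
  rw [show ([] : List Nat) = primesS 2 from primesS_two.symm]
  apply firstPrimesLoop_inv (2 ^ n) 2 n (le_refl 2) (by rw [primesS_two]; simp)
  rcases n with _ | m
  · exact Or.inl rfl
  · refine Or.inr ?_
    have := qStream_le_pow m
    simp only [Nat.add_sub_cancel]
    omega

lemma char_le_iff (a b : Char) : a ≤ b ↔ a.toNat ≤ b.toNat := by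
  rw [Char.le_def, UInt32.le_iff_toNat_le]
  rfl

lemma shift_eq (ch : Char) (k : Nat) (h : PySem.Chars.isalpha ch = true) :
    pyShift ch k = Char.ofNat ((ch.toNat - (if ch ≤ 'Z' then 65 else 97) + k) % 26 + (if ch ≤ 'Z' then 65 else 97)) := by
  simp only [PySem.Chars.isalpha, PySem.Chars.isupper, PySem.Chars.islower, Bool.or_eq_true,
    Bool.and_eq_true, decide_eq_true_eq] at h
  have hZ : ('Z' : Char).toNat = 90 := rfl
  have ha : ('a' : Char).toNat = 97 := rfl
  unfold pyShift
  rcases h with ⟨h1, h2⟩ | ⟨h1, h2⟩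
  · rw [if_pos ⟨h1, h2⟩, if_pos h2]
    congr 1
    omega
  · have hl : 97 ≤ ch.toNat := by rw [← ha]; exact (char_le_iff _ _).mp h1
    have hnZ : ¬ ch ≤ 'Z' := by
      rw [char_le_iff, hZ]; omega
    have hn1 : ¬ ('A' ≤ ch ∧ ch ≤ 'Z') := fun hh => hnZ hh.2
    rw [if_neg hn1, if_pos ⟨h1, h2⟩, if_neg hnZ]
    congr 1
    omega

lemma getD_map_range (n i : Nat) (hi : i < n) : (List.map qStream (List.range n)).getD i 0 = qStream i := by
  rw [List.getD_eq_getElem?_getD, List.getElem?_map, List.getElem?_range hi]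
  rfl

lemma fold_eq : ∀ (l : List Char) (out : List Char) (i cand n : Nat),
    i + l.countP (fun ch => PySem.Chars.isalpha ch) = n → 2 ≤ cand → findNext cand = qStream i →
    (l.foldl (stepA (List.map qStream (List.range n))) (out, i)).1 = (l.foldl stepB (out, cand)).1 := by
  intro l
  induction l with
  | nil => intro out i cand n h hc hq; rfl
  | cons a l ih =>
    intro out i cand n h hc hq
    by_cases ha : PySem.Chars.isalpha a = true
    · have hcount : (a :: l).countP (fun ch => PySem.Chars.isalpha ch)
          = l.countP (fun ch => PySem.Chars.isalpha ch) + 1 := by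
        simp [ha]
      have hi : i < n := by omega
      simp only [List.foldl_cons, stepA, stepB, ha, if_true]
      rw [getD_map_range n i hi, hq, shift_eq a (qStream i) ha]
      exact ih _ (i + 1) (qStream i + 1) n (by omega) (by have := qStream_two_le i; omega) rfl
    · have ha' : PySem.Chars.isalpha a = false := by simpa using ha
      have hcount : (a :: l).countP (fun ch => PySem.Chars.isalpha ch)
          = l.countP (fun ch => PySem.Chars.isalpha ch) := by
        simp [ha']
      simp only [List.foldl_cons, stepA, stepB, ha', Bool.false_eq_true, if_false]
      exact ih _ i cand n (by omega) hc hq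

lemma letters_count_aux (l : List Char) : ∀ a : Nat,
    l.foldl (fun acc ch => if PySem.Chars.isalpha ch then acc + 1 else acc) a
      = a + l.countP (fun ch => PySem.Chars.isalpha ch) := by
  induction l with
  | nil => intro a; simp
  | cons x l ih =>
    intro a
    simp only [List.foldl_cons, List.countP_cons, ih]
    split_ifs with hx
    · omega
    · omega

lemma letters_count (l : List Char) :
    l.foldl (fun acc ch => if PySem.Chars.isalpha ch then acc + 1 else acc) 0
      = l.countP (fun ch => PySem.Chars.isalpha ch) := by
  simpa using letters_count_aux l 0

-- ===== VERDICT (by name: the statement is the Claim_ definition above) =====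
theorem prime_step_caesar_encrypt_spec : Claim_equal_prime_step_caesar_encrypt := by
  intro plaintext _
  show prime_step_caesar_encrypt plaintext = prime_step_caesar_encrypt_alt plaintext
  simp only [prime_step_caesar_encrypt, prime_step_caesar_encrypt_alt]
  rw [letters_count, firstPrimes_eq]
  rw [fold_eq plaintext.toList [] 0 2 (plaintext.toList.countP (fun ch => PySem.Chars.isalpha ch)) (by omega) (by norm_num) rfl]
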